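-- pv_equiv track=rewrite | github.com/VladKha/CodeWars | 6 kyu/String reduction/solve.py | solve
-- ===== SOURCE A (Python) =====
-- from collections import Counter
--
-- def solve(a, b):
--     c_diff, c_b = Counter(a), Counter(b)
--     c_diff.subtract(c_b)
--     result = 0
--     for k,v in c_diff.items():
--         if v >= 0:
--             result += v
--         else:
--             return 0
--     return result
-- ===== SOURCE B (Python) =====
-- from collections import Counter
--
-- def solve(a, b):
--     c_a, c_b = Counter(a), Counter(b)
--     if all(v <= c_a[k] for k, v in c_b.items()):
--         return len(a) - len(b)
--     return 0
-- ===== Notes on version B (the rewrite author's own statement) =====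
-- stated objective: simpler
-- what changed: Replaces the subtract-then-accumulate loop with early return by a multiset-containment check (every count of b bounded by a's) plus the closed form len(a)-len(b).
import Mathlib
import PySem

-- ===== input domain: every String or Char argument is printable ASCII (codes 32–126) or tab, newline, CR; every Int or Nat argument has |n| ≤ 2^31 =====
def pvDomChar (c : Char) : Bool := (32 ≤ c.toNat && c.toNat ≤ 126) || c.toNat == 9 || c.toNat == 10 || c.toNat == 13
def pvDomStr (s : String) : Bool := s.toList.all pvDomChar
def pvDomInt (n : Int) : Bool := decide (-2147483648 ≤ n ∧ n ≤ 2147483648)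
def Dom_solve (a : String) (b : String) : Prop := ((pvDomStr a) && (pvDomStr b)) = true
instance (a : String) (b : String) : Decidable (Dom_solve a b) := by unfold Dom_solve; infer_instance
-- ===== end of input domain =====

-- B replaces A's subtract-then-accumulate loop (with early return) by a containment check plus the closed form len(a)-len(b); equal return values are proved below.

-- ===== PORT A =====
-- the 'for k,v in c_diff.items(): …' loop with the early 'return 0'
def solveLoop : List (Char × Int) → Int → Int
  | [], result => result
  | (_, v) :: rest, result => if 0 ≤ v then solveLoop rest (result + v) else 0

def solve (a : String) (b : String) : Int :=
  let c_diff := PySem.Dict.counter a.toList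
  let c_b := PySem.Dict.counter b.toList
  -- c_diff.subtract(c_b): for each (k,v) of c_b, c_diff[k] = c_diff.get(k,0) - v
  let c_diff := c_b.items.foldl (fun d kv => d.insert kv.1 (d.getD kv.1 0 - kv.2)) c_diff
  solveLoop c_diff.items 0

-- ===== PORT B =====
def solve_alt (a : String) (b : String) : Int :=
  let c_a := PySem.Dict.counter a.toList
  let c_b := PySem.Dict.counter b.toList
  if c_b.items.all (fun kv => decide (kv.2 ≤ c_a.getD kv.1 0)) then
    PySem.Str.len a - PySem.Str.len b
  else 0

-- ===== PRECONDITION & SPEC =====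
def Spec_solve (a : String) (b : String) (out : Int) : Prop := out = solve_alt a b
instance (a : String) (b : String) (out : Int) : Decidable (Spec_solve a b out) := by unfold Spec_solve; infer_instance

-- ===== CLAIM (what is proved, stated in full; the proofs are below) =====
def Claim_equal_solve : Prop := ∀ (a : String) (b : String), Dom_solve a b → Spec_solve a b (solve a b)

-- ===== LEMMAS AND PROOFS =====

-- A's loop: returns acc + sum of values if all are nonnegative, else 0
theorem solveLoop_spec (l : List (Char × Int)) (acc : Int) :
    solveLoop l acc = if l.all (fun p => decide (0 ≤ p.2)) then acc + (l.map (·.2)).sum else 0 := by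
  induction l generalizing acc with
  | nil => simp [solveLoop]
  | cons p rest ih =>
    obtain ⟨k, v⟩ := p
    simp only [solveLoop, List.all_cons, List.map_cons, List.sum_cons]
    by_cases hv : 0 ≤ v
    · rw [if_pos hv, ih]
      by_cases hr : rest.all (fun p => decide (0 ≤ p.2))
      · simp [hr, hv]; ring
      · simp [hr, hv]
    · simp [hv]

-- value of the subtract fold at any key (keys of l distinct)
theorem subfold_getD (l : List (Char × Int)) (d : PySem.Dict Char Int) (k : Char)
    (hn : (l.map Prod.fst).Nodup) :
    (l.foldl (fun d kv => d.insert kv.1 (d.getD kv.1 0 - kv.2)) d).getD k 0 =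
      d.getD k 0 - ((l.filter (fun p => p.1 = k)).map (·.2)).sum := by
  induction l generalizing d with
  | nil => simp
  | cons p rest ih =>
    obtain ⟨k0, v0⟩ := p
    simp only [List.map_cons, List.nodup_cons] at hn
    simp only [List.foldl_cons]
    rw [ih _ hn.2]
    by_cases hk : k = k0
    · subst hk
      have hrest : rest.filter (fun p => p.1 = k) = [] := by
        rw [List.filter_eq_nil_iff]
        intro p hp hpk
        simp only [decide_eq_true_eq] at hpk
        exact hn.1 (List.mem_map.mpr ⟨p, hp, hpk⟩)
      simp [hrest]
    · rw [PySem.Dict.getD_insert]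
      simp only [if_neg hk]
      simp [Ne.symm hk]

-- exactly one element of a Nodup list equals x
theorem sum_indicator (K : List Char) (x : Char) (hK : K.Nodup) (hx : x ∈ K) :
    (K.map (fun k => if x = k then (1 : Int) else 0)).sum = 1 := by
  induction K with
  | nil => simp at hx
  | cons k0 K' ihK =>
    rcases List.nodup_cons.mp hK with ⟨hk0, hK'⟩
    rcases List.mem_cons.mp hx with h | h
    · subst h
      have : (K'.map (fun k => if x = k then (1 : Int) else 0)).sum = 0 := by
        apply List.sum_eq_zero
        intro y hy
        rcases List.mem_map.mp hy with ⟨k, hk, rfl⟩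
        simp [show x ≠ k from fun h => hk0 (h ▸ hk)]
      simp [this]
    · have hne : x ≠ k0 := fun hxe => hk0 (hxe ▸ h)
      simp [hne, ihK hK' h]

-- sum of counts of l over a Nodup list K covering l equals the length of l
theorem sum_counts (K l : List Char) (hK : K.Nodup) (hcov : ∀ x ∈ l, x ∈ K) :
    (K.map (fun k => (l.count k : Int))).sum = l.length := by
  induction l with
  | nil => simp
  | cons x l ih =>
    have hx : x ∈ K := hcov x (by simp)
    have hcov' : ∀ y ∈ l, y ∈ K := fun y hy => hcov y (by simp [hy])
    have hone := sum_indicator K x hK hx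
    calc (K.map (fun k => ((x :: l).count k : Int))).sum
        = (K.map (fun k => (l.count k : Int) + if x = k then 1 else 0)).sum := by
          congr 1; apply List.map_congr_left; intro k _
          rw [List.count_cons]
          by_cases h : x = k <;> simp [h]
      _ = (K.map (fun k => (l.count k : Int))).sum + (K.map (fun k => if x = k then (1:Int) else 0)).sum := by
          rw [← List.sum_map_add]
      _ = l.length + 1 := by rw [ih hcov', hone]
      _ = ((x :: l).length : Int) := by simp

-- a Nodup list containing k filters (· = k) to [k]
theorem nodup_filter_eq (s : List Char) (k : Char) (h : s.Nodup) (hm : k ∈ s) :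
    s.filter (fun x => x = k) = [k] := by
  induction s with
  | nil => simp at hm
  | cons x s ih =>
    rcases List.nodup_cons.mp h with ⟨hx, hs⟩
    by_cases hxk : x = k
    · subst hxk
      have hnil : s.filter (fun y => y = x) = [] := by
        rw [List.filter_eq_nil_iff]
        intro y hy hyk
        simp only [decide_eq_true_eq] at hyk
        exact hx (hyk ▸ hy)
      simp [hnil]
    · have hk : k ∈ s := by
        rcases List.mem_cons.mp hm with h' | h'
        · exact absurd h'.symm hxk
        · exact h'
      simp [hxk, ih hs hk]

-- the filtered-sum over Counter(lb)'s items at key k is lb.count k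
theorem filter_counter_items (lb : List Char) (k : Char) :
    ((((PySem.Set.ofList lb).map (fun k => (k, (lb.count k : Int)))).filter
        (fun p => p.1 = k)).map (·.2)).sum = lb.count k := by
  rw [List.filter_map]
  have hpred : (PySem.Set.ofList lb).filter
      ((fun p : Char × Int => decide (p.1 = k)) ∘ (fun k => (k, (lb.count k : Int)))) =
      (PySem.Set.ofList lb).filter (fun x => x = k) := by
    apply List.filter_congr; intro x _; simp
  rw [hpred]
  by_cases hk : k ∈ lb
  · rw [nodup_filter_eq _ _ (PySem.Set.nodup_ofList lb) ((PySem.Set.mem_ofList lb k).mpr hk)]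
    simp
  · have : (PySem.Set.ofList lb).filter (fun x => x = k) = [] := by
      rw [List.filter_eq_nil_iff]
      intro x hx hxk
      simp only [decide_eq_true_eq] at hxk
      exact hk (hxk ▸ (PySem.Set.mem_ofList lb x).mp hx)
    simp [this, List.count_eq_zero_of_not_mem hk]

-- sum of differences splits
theorem sum_map_sub (K : List Char) (f g : Char → Int) :
    (K.map (fun k => f k - g k)).sum = (K.map f).sum - (K.map g).sum := by
  induction K with
  | nil => simp
  | cons k K ih => simp [ih]; ring

theorem solve_eq_alt (a b : String) : solve a b = solve_alt a b := by
  unfold solve solve_alt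
  simp only []
  set la := a.toList with hla
  set lb := b.toList with hlb
  set cb := PySem.Dict.counter (κ := Char) lb with hcb
  set D := cb.items.foldl (fun d kv => d.insert kv.1 (d.getD kv.1 0 - kv.2))
      (PySem.Dict.counter la) with hD
  have hcbitems : cb.items = (PySem.Set.ofList lb).map (fun k => (k, (lb.count k : Int))) := by
    rw [hcb]; exact PySem.Dict.items_counter lb
  have hnfst : (cb.items.map Prod.fst).Nodup := by
    rw [hcbitems, List.map_map]
    have hid : Prod.fst ∘ (fun k : Char => (k, (lb.count k : Int))) = id := rfl
    rw [hid, List.map_id]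
    exact PySem.Set.nodup_ofList lb
  -- value of D at any key
  have hgetD : ∀ k, D.getD k 0 = (la.count k : Int) - lb.count k := by
    intro k
    rw [hD, subfold_getD _ _ _ hnfst, PySem.Dict.getD_counter, hcbitems, filter_counter_items]
  have hKnd : D.keys.Nodup := by
    rw [hD]
    exact PySem.Dict.nodup_keys_foldl_insert_key _ _ _ _ (by simp)
  have hmemK : ∀ x, x ∈ la ∨ x ∈ lb → x ∈ D.keys := by
    intro x hx
    rw [hD, PySem.Dict.keys_foldl_insert_key]
    rw [PySem.Set.mem_update]
    rcases hx with h | h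
    · left; rw [PySem.Dict.keys_counter]; exact (PySem.Set.mem_ofList la x).mpr h
    · right; rw [hcbitems, List.map_map]
      have hid : Prod.fst ∘ (fun k : Char => (k, (lb.count k : Int))) = id := rfl
      rw [hid, List.map_id]
      exact (PySem.Set.mem_ofList lb x).mpr h
  have hitems : D.items = D.keys.map (fun k => (k, D.getD k 0)) :=
    PySem.Dict.items_eq_map_keys D hKnd 0
  -- the two containment tests agree
  have hcond : (D.items.all (fun p => decide (0 ≤ p.2))) =
      (cb.items.all (fun kv => decide (kv.2 ≤ (PySem.Dict.counter la).getD kv.1 0))) := by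
    rw [Bool.eq_iff_iff, hitems, hcbitems]
    simp only [List.all_map, List.all_eq_true, Function.comp_apply, decide_eq_true_eq,
      PySem.Dict.getD_counter]
    constructor
    · intro h k hk
      have := h k (hmemK k (Or.inr ((PySem.Set.mem_ofList lb k).mp hk)))
      rw [hgetD] at this
      omega
    · intro h k hk
      rw [hgetD]
      by_cases hkb : k ∈ lb
      · have := h k ((PySem.Set.mem_ofList lb k).mpr hkb)
        omega
      · have : lb.count k = 0 := List.count_eq_zero_of_not_mem hkb
        omega
  rw [solveLoop_spec, hcond]
  by_cases hc : cb.items.all (fun kv => decide (kv.2 ≤ (PySem.Dict.counter la).getD kv.1 0))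
  · rw [if_pos hc, if_pos hc]
    -- sum of D's values = len a - len b
    have hsum : (D.items.map (·.2)).sum = (la.length : Int) - lb.length := by
      rw [hitems, List.map_map]
      have : ((fun x => x.2) ∘ fun k => (k, D.getD k 0)) = fun k => D.getD k 0 := rfl
      rw [this]
      have : (D.keys.map (fun k => D.getD k 0)) =
          D.keys.map (fun k => (la.count k : Int) - lb.count k) := by
        apply List.map_congr_left; intro k _; exact hgetD k
      rw [this, sum_map_sub,
        sum_counts D.keys la hKnd (fun x hx => hmemK x (Or.inl hx)),
        sum_counts D.keys lb hKnd (fun x hx => hmemK x (Or.inr hx))]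
    rw [hsum, PySem.Str.len_eq, PySem.Str.len_eq]
    simp [hla, hlb]
  · rw [if_neg hc, if_neg hc]

-- ===== VERDICT (by name: the statement is the Claim_ definition above) =====
theorem solve_spec : Claim_equal_solve := by
  intro a b _
  unfold Spec_solve
  exact solve_eq_alt a b
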